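-- pv_equiv track=rewrite | github.com/ksumini/Algorithm-Study2.0 | Programmers/홀짝트리/yerin.py | divide_by_group
-- ===== SOURCE A (Python) =====
-- def divide_by_group(groups, group_num, cur_node, graph, visited):
--     if len(graph[cur_node]) % 2 == 0:  # 자식 노드 개수: 짝수
--         if cur_node % 2 == 0:  # 현재 노드 정수가 짝수 -> 홀짝
--             groups[group_num][0].append(cur_node)
--         else:  # 역홀짝
--             groups[group_num][1].append(cur_node)
--     else:  # 자식 노드 개수: 홀수
--         if cur_node % 2 == 0:  # 역홀짝
--             groups[group_num][1].append(cur_node)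
--         else:  # 홀짝
--             groups[group_num][0].append(cur_node)
--     visited.add(cur_node)
--
--     for nxt_node in graph[cur_node]:
--         if nxt_node in visited:
--             continue
--         divide_by_group(groups, group_num, nxt_node, graph, visited)
--
--     return groups, visited
-- ===== SOURCE B (Python) =====
-- def divide_by_group(groups, group_num, cur_node, graph, visited):
--     # Iterative stack-based DFS; single parity-index formula replaces the
--     # four-branch classification.  Mutates groups and visited in place like A.
--     def classify(node):
--         groups[group_num][(len(graph[node]) + node) % 2].append(node)
--         visited.add(node)
--
--     classify(cur_node)
--     stack = list(reversed(graph[cur_node]))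
--     while stack:
--         node = stack.pop()
--         if node in visited:
--             continue
--         classify(node)
--         stack.extend(reversed(graph[node]))
--     return groups, visited
-- ===== Notes on version B (the rewrite author's own statement) =====
-- stated objective: alternative
-- what changed: The recursive DFS is replaced by an iterative explicit-stack DFS (neighbors pushed in reversed order, visited check on pop, so the pre-order append sequence is identical), and the four-branch parity classification is replaced by a single index formula (len(adj)+node) % 2.
import Mathlib
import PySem

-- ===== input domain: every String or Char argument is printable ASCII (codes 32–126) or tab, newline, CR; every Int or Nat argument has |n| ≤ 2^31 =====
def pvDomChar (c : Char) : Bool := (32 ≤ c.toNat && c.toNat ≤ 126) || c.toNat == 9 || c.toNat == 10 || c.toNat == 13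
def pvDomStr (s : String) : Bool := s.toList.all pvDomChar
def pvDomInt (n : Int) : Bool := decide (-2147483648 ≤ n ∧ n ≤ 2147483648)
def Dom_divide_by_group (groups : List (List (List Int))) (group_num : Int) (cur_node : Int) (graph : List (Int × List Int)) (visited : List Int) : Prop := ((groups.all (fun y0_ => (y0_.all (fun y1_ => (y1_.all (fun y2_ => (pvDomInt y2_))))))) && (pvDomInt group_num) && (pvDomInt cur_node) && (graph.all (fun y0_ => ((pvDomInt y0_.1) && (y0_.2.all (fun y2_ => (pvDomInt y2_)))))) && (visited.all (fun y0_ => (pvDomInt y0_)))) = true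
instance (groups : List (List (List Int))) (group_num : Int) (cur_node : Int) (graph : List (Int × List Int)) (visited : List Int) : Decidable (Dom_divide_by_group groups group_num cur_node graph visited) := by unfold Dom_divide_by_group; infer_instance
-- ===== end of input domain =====

-- B replaces the recursive DFS by an iterative explicit-stack DFS with a single
-- parity-index formula; equivalence of the return value is proved (both Pythons
-- also mutate `groups`/`visited` in place in the same way).

-- ===== PORT A =====
-- graph[n] : dict lookup; a missing key (Python KeyError) is excluded by Pre_
def pvAdjA (graph : List (Int × List Int)) (n : Int) : List Int :=
  (PySem.Dict.mk graph).getD n []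

-- the classification + visited.add part of A's body (four parity branches)
def pvClassifyA (group_num : Int) (graph : List (Int × List Int)) (cur : Int)
    (s : List (List (List Int)) × List Int) : List (List (List Int)) × List Int :=
  let adj := pvAdjA graph cur
  let g := PySem.List.pyGetD s.1 group_num []
  let g' :=
    if PySem.Int.mod (adj.length : Int) 2 == 0 then
      if PySem.Int.mod cur 2 == 0 then
        PySem.List.pySetD g 0 (PySem.List.pyGetD g 0 [] ++ [cur])
      else
        PySem.List.pySetD g 1 (PySem.List.pyGetD g 1 [] ++ [cur])
    else
      if PySem.Int.mod cur 2 == 0 then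
        PySem.List.pySetD g 1 (PySem.List.pyGetD g 1 [] ++ [cur])
      else
        PySem.List.pySetD g 0 (PySem.List.pyGetD g 0 [] ++ [cur])
  (PySem.List.pySetD s.1 group_num g', PySem.Set.add s.2 cur)

-- A's recursion; the fuel (graph.length + 1 at the top call) only makes the
-- recursion structurally total and is never exhausted on inputs inside Pre_
def pvDfsA (group_num : Int) (graph : List (Int × List Int)) :
    Nat → Int → List (List (List Int)) × List Int → List (List (List Int)) × List Int
  | 0, _, s => s
  | f + 1, cur, s =>
    (pvAdjA graph cur).foldl
      (fun t n => if n ∈ t.2 then t else pvDfsA group_num graph f n t)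
      (pvClassifyA group_num graph cur s)

def divide_by_group (groups : List (List (List Int))) (group_num : Int) (cur_node : Int) (graph : List (Int × List Int)) (visited : List Int) : List (List (List Int)) × List Int :=
  pvDfsA group_num graph (graph.length + 1) cur_node (groups, visited)

-- ===== PORT B =====
def pvAdjB (graph : List (Int × List Int)) (n : Int) : List Int :=
  (PySem.Dict.mk graph).getD n []

-- B's classify helper: one parity formula instead of four branches
def pvClassifyB (group_num : Int) (graph : List (Int × List Int)) (node : Int)
    (s : List (List (List Int)) × List Int) : List (List (List Int)) × List Int :=
  let slot := PySem.Int.mod (((pvAdjB graph node).length : Int) + node) 2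
  let g := PySem.List.pyGetD s.1 group_num []
  (PySem.List.pySetD s.1 group_num
      (PySem.List.pySetD g slot (PySem.List.pyGetD g slot [] ++ [node])),
   PySem.Set.add s.2 node)

-- B's while-loop over the explicit stack (head = top of the Python stack:
-- 'stack.extend(reversed(adj)); stack.pop()' pops adj in original order, i.e.
-- the new stack is adj ++ rest); the fuel only makes the loop structurally
-- total and is never exhausted on inputs inside Pre_
def pvLoopB (group_num : Int) (graph : List (Int × List Int)) :
    Nat → List Int → List (List (List Int)) × List Int → List (List (List Int)) × List Int
  | _, [], s => s
  | 0, _, s => s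
  | f + 1, n :: rest, s =>
    if n ∈ s.2 then pvLoopB group_num graph f rest s
    else pvLoopB group_num graph f (pvAdjB graph n ++ rest) (pvClassifyB group_num graph n s)

def divide_by_group_alt (groups : List (List (List Int))) (group_num : Int) (cur_node : Int) (graph : List (Int × List Int)) (visited : List Int) : List (List (List Int)) × List Int :=
  let s1 := pvClassifyB group_num graph cur_node (groups, visited)
  pvLoopB group_num graph
    (graph.foldl (fun a p => a + p.2.length) 0 + (pvAdjB graph cur_node).length + 1)
    (pvAdjB graph cur_node) s1

-- ===== PRECONDITION & SPEC =====
-- Pre_-side adjacency lookup (kept separate from the ports' helpers)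
def pvAdjP (graph : List (Int × List Int)) (n : Int) : List Int :=
  (PySem.Dict.mk graph).getD n []

-- one expansion step of graph reachability that stops at already-visited nodes
def pvStepR (graph : List (Int × List Int)) (visited : List Int) (S : List Int) : List Int :=
  S.foldl (fun acc n =>
    (pvAdjP graph n).foldl
      (fun acc2 m => if m ∈ visited then acc2 else PySem.Set.add acc2 m) acc) S

-- the nodes A's traversal touches: cur_node plus everything reachable from it
-- through nodes outside `visited` (graph.length + 1 expansions reach the fixpoint)
def pvReach (graph : List (Int × List Int)) (visited : List Int) (cur : Int) : List Int :=
  (List.range (graph.length + 1)).foldl (fun S _ => pvStepR graph visited S) [cur]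

-- Pre_ is exactly A's domain: the group index is in range, and every touched
-- node (a closed reachability property of the input graph, not a run of either
-- port) is a key of graph whose parity slot exists in groups[group_num];
-- otherwise Python A raises IndexError or KeyError.
def Pre_divide_by_group (groups : List (List (List Int))) (group_num : Int) (cur_node : Int) (graph : List (Int × List Int)) (visited : List Int) : Prop :=
  PySem.Raise.InRange groups.length group_num ∧
  ∀ m ∈ pvReach graph visited cur_node,
    m ∈ graph.map Prod.fst ∧
    PySem.Int.mod (((pvAdjP graph m).length : Int) + m) 2 <
      ((PySem.List.pyGetD groups group_num []).length : Int)

instance (groups : List (List (List Int))) (group_num : Int) (cur_node : Int) (graph : List (Int × List Int)) (visited : List Int) : Decidable (Pre_divide_by_group groups group_num cur_node graph visited) := by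
  unfold Pre_divide_by_group; infer_instance

def pvWitness_divide_by_group : List (List (List Int)) × Int × Int × (List (Int × List Int)) × List Int :=
  ([[[], []]], 0, 0, [(0, [1]), (1, [0])], [])

def Spec_divide_by_group (groups : List (List (List Int))) (group_num : Int) (cur_node : Int) (graph : List (Int × List Int)) (visited : List Int) (out : List (List (List Int)) × List Int) : Prop := out = divide_by_group_alt groups group_num cur_node graph visited
instance (groups : List (List (List Int))) (group_num : Int) (cur_node : Int) (graph : List (Int × List Int)) (visited : List Int) (out : List (List (List Int)) × List Int) : Decidable (Spec_divide_by_group groups group_num cur_node graph visited out) := by unfold Spec_divide_by_group; infer_instance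

-- ===== CLAIM (what is proved, stated in full; the proofs are below) =====
def Claim_equal_divide_by_group : Prop := ∀ (groups : List (List (List Int))) (group_num : Int) (cur_node : Int) (graph : List (Int × List Int)) (visited : List Int), Dom_divide_by_group groups group_num cur_node graph visited → Pre_divide_by_group groups group_num cur_node graph visited → Spec_divide_by_group groups group_num cur_node graph visited (divide_by_group groups group_num cur_node graph visited)

-- ===== LEMMAS AND PROOFS =====

-- remaining-work measure for the stack loop: total adjacency length of the
-- not-yet-visited dictionary entries
def pvR (graph : List (Int × List Int)) (v : List Int) : Nat :=
  match graph with
  | [] => 0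
  | p :: g => (if p.1 ∈ v then 0 else p.2.length) + pvR g v

-- number of unvisited keys
def pvCard (graph : List (Int × List Int)) (v : List Int) : Nat :=
  ((graph.map Prod.fst).toFinset \ v.toFinset).card

lemma pv_mem_add {v : List Int} {n a : Int} (h : a ∈ v ∨ a = n) : a ∈ PySem.Set.add v n := by
  exact (PySem.Set.mem_add v n a).2 h

lemma pv_toFinset_add (v : List Int) (n : Int) :
    (PySem.Set.add v n).toFinset = insert n v.toFinset := by
  unfold PySem.Set.add
  split
  · next hc =>
    have : n ∈ v := by simpa using hc
    simp [Finset.insert_eq_self.2 (List.mem_toFinset.2 this)]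
  · ext a
    simp [List.toFinset_append]

lemma pv_mod_two (a : Int) : PySem.Int.mod a 2 = a % 2 := by
  simp [PySem.Int.mod, Int.fmod_eq_emod]

lemma pv_classify_eq (group_num : Int) (graph : List (Int × List Int)) (x : Int)
    (s : List (List (List Int)) × List Int) :
    pvClassifyA group_num graph x s = pvClassifyB group_num graph x s := by
  have hL := Int.emod_two_eq ((((PySem.Dict.mk graph).getD x []).length : Int))
  have hx := Int.emod_two_eq x
  unfold pvClassifyA pvClassifyB pvAdjA pvAdjB
  rcases hL with hL | hL <;> rcases hx with hx | hx <;>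
    simp [pv_mod_two, hL, hx, Int.add_emod]

lemma pv_visMono_foldl (group_num : Int) (graph : List (Int × List Int)) (f : Nat)
    (hf : ∀ x s a, a ∈ s.2 → a ∈ (pvDfsA group_num graph f x s).2) :
    ∀ (l : List Int) (s : List (List (List Int)) × List Int) (a : Int), a ∈ s.2 →
      a ∈ (l.foldl (fun t n => if n ∈ t.2 then t else pvDfsA group_num graph f n t) s).2 := by
  intro l
  induction l with
  | nil => intro s a h; simpa using h
  | cons n t ih =>
    intro s a h
    simp only [List.foldl_cons]
    by_cases hn : n ∈ s.2
    · rw [if_pos hn]; exact ih s a h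
    · rw [if_neg hn]; exact ih _ a (hf n s a h)

lemma pv_visMono (group_num : Int) (graph : List (Int × List Int)) :
    ∀ (f : Nat) (x : Int) (s : List (List (List Int)) × List Int) (a : Int),
      a ∈ s.2 → a ∈ (pvDfsA group_num graph f x s).2 := by
  intro f
  induction f with
  | zero => intro x s a h; simpa [pvDfsA] using h
  | succ f ih =>
    intro x s a h
    simp only [pvDfsA]
    have hc : a ∈ (pvClassifyA group_num graph x s).2 := by
      simp only [pvClassifyA]
      exact pv_mem_add (Or.inl h)
    exact pv_visMono_foldl group_num graph f ih (pvAdjA graph x) _ a hc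

lemma pv_R_mono (graph : List (Int × List Int)) {v w : List Int} (h : ∀ a, a ∈ v → a ∈ w) :
    pvR graph w ≤ pvR graph v := by
  induction graph with
  | nil => simp [pvR]
  | cons p g ih =>
    simp only [pvR]
    by_cases hv : p.1 ∈ v
    · rw [if_pos hv, if_pos (h _ hv)]; simpa using ih
    · rw [if_neg hv]; split <;> omega

lemma pv_card_mono (graph : List (Int × List Int)) {v w : List Int} (h : ∀ a, a ∈ v → a ∈ w) :
    pvCard graph w ≤ pvCard graph v := by
  unfold pvCard
  apply Finset.card_le_card
  intro a ha
  simp only [Finset.mem_sdiff, List.mem_toFinset] at ha ⊢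
  exact ⟨ha.1, fun hv => ha.2 (h a hv)⟩

lemma pv_adj_AB (graph : List (Int × List Int)) (n : Int) : pvAdjA graph n = pvAdjB graph n := rfl

lemma pv_adj_nil (n : Int) : pvAdjB [] n = [] := by
  simp [pvAdjB, PySem.Dict.getD, PySem.Dict.get?]

lemma pv_adj_cons (p : Int × List Int) (g : List (Int × List Int)) (n : Int) :
    pvAdjB (p :: g) n = if p.1 = n then p.2 else pvAdjB g n := by
  obtain ⟨k, v⟩ := p
  simp only [pvAdjB, PySem.Dict.getD, PySem.Dict.get?_mk_cons, beq_iff_eq]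
  split <;> simp

lemma pv_adj_nonkey (graph : List (Int × List Int)) {n : Int}
    (h : n ∉ graph.map Prod.fst) : pvAdjB graph n = [] := by
  induction graph with
  | nil => exact pv_adj_nil n
  | cons p g ih =>
    simp only [List.map_cons, List.mem_cons] at h
    rw [pv_adj_cons, if_neg (fun e => h (Or.inl e.symm)), ih (fun m => h (Or.inr m))]

lemma pv_R_drop (graph : List (Int × List Int)) {v : List Int} {n : Int} (h : n ∉ v) :
    (pvAdjB graph n).length + pvR graph (PySem.Set.add v n) ≤ pvR graph v := by
  induction graph with
  | nil => simp [pvR, pv_adj_nil]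
  | cons p g ih =>
    simp only [pvR, pv_adj_cons]
    by_cases hpn : p.1 = n
    · rw [if_pos hpn]
      have h1 : p.1 ∉ v := by rw [hpn]; exact h
      have h2 : p.1 ∈ PySem.Set.add v n := pv_mem_add (Or.inr hpn)
      rw [if_neg h1, if_pos h2]
      have hm := pv_R_mono g (v := v) (w := PySem.Set.add v n) (fun a ha => pv_mem_add (Or.inl ha))
      omega
    · rw [if_neg hpn]
      have hiff : p.1 ∈ PySem.Set.add v n ↔ p.1 ∈ v := by
        rw [PySem.Set.mem_add]
        constructor
        · rintro (h' | h')
          · exact h'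
          · exact absurd h' hpn
        · exact Or.inl
      by_cases hv : p.1 ∈ v
      · rw [if_pos hv, if_pos (hiff.2 hv)]; omega
      · rw [if_neg hv, if_neg (fun hh => hv (hiff.1 hh))]; omega

lemma pv_card_drop (graph : List (Int × List Int)) {v : List Int} {n : Int}
    (hk : n ∈ graph.map Prod.fst) (h : n ∉ v) :
    pvCard graph (PySem.Set.add v n) < pvCard graph v := by
  unfold pvCard
  apply Finset.card_lt_card
  rw [pv_toFinset_add]
  have hsub : (graph.map Prod.fst).toFinset \ insert n v.toFinset ⊆
      (graph.map Prod.fst).toFinset \ v.toFinset := by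
    intro a ha
    simp only [Finset.mem_sdiff, Finset.mem_insert, List.mem_toFinset] at ha ⊢
    tauto
  have hmem : n ∈ (graph.map Prod.fst).toFinset \ v.toFinset := by
    simp only [Finset.mem_sdiff, List.mem_toFinset]
    exact ⟨hk, h⟩
  have hnot : n ∉ (graph.map Prod.fst).toFinset \ insert n v.toFinset := by simp
  exact (Finset.ssubset_iff_of_subset hsub).2 ⟨n, hmem, hnot⟩

lemma pv_R_le_total (graph : List (Int × List Int)) (v : List Int) (a0 : Nat) :
    pvR graph v + a0 ≤ graph.foldl (fun a p => a + p.2.length) a0 := by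
  induction graph generalizing a0 with
  | nil => simp [pvR]
  | cons p g ih =>
    simp only [pvR, List.foldl_cons]
    have h1 := ih (a0 + p.2.length)
    split <;> omega

-- fuel irrelevance of the stack loop above the remaining-work bound
lemma pv_loop_fuel (group_num : Int) (graph : List (Int × List Int)) :
    ∀ (k : Nat) (stk : List Int) (s : List (List (List Int)) × List Int) (f f' : Nat),
      stk.length + pvR graph s.2 < k → k ≤ f → k ≤ f' →
      pvLoopB group_num graph f stk s = pvLoopB group_num graph f' stk s := by
  intro k
  induction k with
  | zero => intro stk s f f' hb; omega
  | succ k ih =>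
    intro stk s f f' hb hf hf'
    match stk with
    | [] => cases f <;> cases f' <;> simp [pvLoopB]
    | n :: rest =>
      match f, f' with
      | fa + 1, fb + 1 =>
        simp only [pvLoopB]
        simp only [List.length_cons] at hb
        by_cases hn : n ∈ s.2
        · rw [if_pos hn, if_pos hn]
          exact ih rest s fa fb (by omega) (by omega) (by omega)
        · rw [if_neg hn, if_neg hn]
          have hdrop := pv_R_drop graph (v := s.2) (n := n) hn
          have hclass : (pvClassifyB group_num graph n s).2 = PySem.Set.add s.2 n := rfl
          apply ih
          · rw [hclass, List.length_append]; omega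
          · omega
          · omega

-- the bridge: running the stack loop on l ++ stk equals folding A's recursive
-- step over l and then running the loop on stk
lemma pv_bridge (group_num : Int) (graph : List (Int × List Int)) :
    ∀ (k : Nat) (l : List Int) (s : List (List (List Int)) × List Int)
      (stk : List Int) (fA fB fB' : Nat),
      pvCard graph s.2 < k → k ≤ fA →
      l.length + stk.length + pvR graph s.2 < fB →
      stk.length + pvR graph s.2 < fB' →
      pvLoopB group_num graph fB (l ++ stk) s =
        pvLoopB group_num graph fB' stk
          (l.foldl (fun t n => if n ∈ t.2 then t else pvDfsA group_num graph fA n t) s) := by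
  intro k
  induction k with
  | zero => intro l s stk fA fB fB' hc; omega
  | succ k ih =>
    intro l
    induction l with
    | nil =>
      intro s stk fA fB fB' hc hfA hfB hfB'
      simp only [List.nil_append, List.foldl_nil]
      exact pv_loop_fuel group_num graph (stk.length + pvR graph s.2 + 1) stk s fB fB'
        (by omega) (by omega) (by omega)
    | cons n tl ihl =>
      intro s stk fA fB fB' hc hfA hfB hfB'
      match fA, fB with
      | fa + 1, fb + 1 =>
        simp only [List.length_cons] at hfB
        simp only [List.cons_append, List.foldl_cons, pvLoopB]
        by_cases hn : n ∈ s.2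
        · rw [if_pos hn, if_pos hn]
          exact ihl s stk (fa + 1) fb fB' hc hfA (by omega) hfB'
        · rw [if_neg hn, if_neg hn]
          have hclass : (pvClassifyB group_num graph n s).2 = PySem.Set.add s.2 n := rfl
          have hdrop := pv_R_drop graph (v := s.2) (n := n) hn
          have hsub : ∀ a, a ∈ s.2 → a ∈ PySem.Set.add s.2 n :=
            fun a ha => pv_mem_add (Or.inl ha)
          by_cases hkey : n ∈ graph.map Prod.fst
          · -- n is an unvisited key: bridge its adjacency list, then continue on tl
            have hcard := pv_card_drop graph hkey hn
            have e1 := ih (pvAdjB graph n) (pvClassifyB group_num graph n s) (tl ++ stk)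
              fa fb fb
              (by rw [hclass]; omega)
              (by omega)
              (by rw [hclass, List.length_append]; omega)
              (by rw [hclass, List.length_append]; omega)
            rw [e1]
            have e2 : (pvAdjB graph n).foldl
                (fun t m => if m ∈ t.2 then t else pvDfsA group_num graph fa m t)
                (pvClassifyB group_num graph n s) = pvDfsA group_num graph (fa + 1) n s := by
              simp only [pvDfsA, pv_classify_eq, pv_adj_AB]
            rw [e2]
            have hvis : ∀ a, a ∈ PySem.Set.add s.2 n →
                a ∈ (pvDfsA group_num graph (fa + 1) n s).2 := by
              intro a ha
              simp only [pvDfsA]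
              exact pv_visMono_foldl group_num graph fa
                (pv_visMono group_num graph fa) (pvAdjA graph n) _ a ha
            have hR2 : pvR graph (pvDfsA group_num graph (fa + 1) n s).2 ≤
                pvR graph (PySem.Set.add s.2 n) :=
              pv_R_mono graph hvis
            have hC2 : pvCard graph (pvDfsA group_num graph (fa + 1) n s).2 ≤
                pvCard graph (PySem.Set.add s.2 n) :=
              pv_card_mono graph hvis
            exact ih tl (pvDfsA group_num graph (fa + 1) n s) stk (fa + 1) fb fB'
              (by omega) (by omega) (by omega) (by omega)
          · -- n is unvisited but not a key: its adjacency list is empty on both sides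
            have hadj := pv_adj_nonkey graph hkey
            have e2 : pvDfsA group_num graph (fa + 1) n s = pvClassifyB group_num graph n s := by
              simp only [pvDfsA, pv_classify_eq, pv_adj_AB, hadj, List.foldl_nil]
            rw [hadj, List.nil_append, e2]
            have hRle : pvR graph (pvClassifyB group_num graph n s).2 ≤ pvR graph s.2 := by
              rw [hclass]; exact pv_R_mono graph hsub
            have hCle : pvCard graph (pvClassifyB group_num graph n s).2 ≤ pvCard graph s.2 := by
              rw [hclass]; exact pv_card_mono graph hsub
            exact ihl (pvClassifyB group_num graph n s) stk (fa + 1) fb fB'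
              (by omega) hfA (by omega) (by omega)

lemma pv_grow1 (visited : List Int) :
    ∀ (l acc : List Int) (a : Int), a ∈ acc →
      a ∈ l.foldl (fun acc2 m => if m ∈ visited then acc2 else PySem.Set.add acc2 m) acc := by
  intro l
  induction l with
  | nil => simp
  | cons x t ih =>
    intro acc a h
    simp only [List.foldl_cons]
    by_cases hx : x ∈ visited
    · rw [if_pos hx]; exact ih acc a h
    · rw [if_neg hx]; exact ih _ a (pv_mem_add (Or.inl h))

lemma pv_grow2 (graph : List (Int × List Int)) (visited : List Int) :
    ∀ (l acc : List Int) (a : Int), a ∈ acc →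
      a ∈ l.foldl (fun acc n =>
        (pvAdjP graph n).foldl
          (fun acc2 m => if m ∈ visited then acc2 else PySem.Set.add acc2 m) acc) acc := by
  intro l
  induction l with
  | nil => simp
  | cons x t ih =>
    intro acc a h
    simp only [List.foldl_cons]
    exact ih _ a (pv_grow1 visited (pvAdjP graph x) acc a h)

lemma pv_reach_self (graph : List (Int × List Int)) (visited : List Int) (cur : Int) :
    cur ∈ pvReach graph visited cur := by
  have hgen : ∀ (ks : List Nat) (S : List Int), cur ∈ S →
      cur ∈ ks.foldl (fun S _ => pvStepR graph visited S) S := by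
    intro ks
    induction ks with
    | nil => simp
    | cons k t ih =>
      intro S h
      simp only [List.foldl_cons]
      exact ih _ (pv_grow2 graph visited S S cur h)
  exact hgen _ [cur] (by simp)

-- ===== VERDICT (by name: the statement is the Claim_ definition above) =====
lemma pv_loop_nil (group_num : Int) (graph : List (Int × List Int)) (f : Nat)
    (s : List (List (List Int)) × List Int) : pvLoopB group_num graph f [] s = s := by
  cases f <;> simp [pvLoopB]

theorem divide_by_group_spec : Claim_equal_divide_by_group := by
  intro groups group_num cur_node graph visited hdom hpre
  obtain ⟨h1, hall⟩ := hpre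
  have hcur : cur_node ∈ graph.map Prod.fst :=
    (hall cur_node (pv_reach_self graph visited cur_node)).1
  unfold Spec_divide_by_group divide_by_group divide_by_group_alt
  simp only [pvDfsA, pv_classify_eq, pv_adj_AB]
  have hcurF : cur_node ∈ (graph.map Prod.fst).toFinset := List.mem_toFinset.2 hcur
  have hclass : (pvClassifyB group_num graph cur_node (groups, visited)).2 =
      PySem.Set.add visited cur_node := rfl
  have hc : pvCard graph (pvClassifyB group_num graph cur_node (groups, visited)).2 <
      graph.length := by
    rw [hclass]
    have hsub : (graph.map Prod.fst).toFinset \ (PySem.Set.add visited cur_node).toFinset ⊆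
        (graph.map Prod.fst).toFinset.erase cur_node := by
      intro a ha
      rw [pv_toFinset_add] at ha
      simp only [Finset.mem_sdiff, Finset.mem_insert, not_or] at ha
      exact Finset.mem_erase.2 ⟨ha.2.1, ha.1⟩
    calc pvCard graph (PySem.Set.add visited cur_node)
        ≤ ((graph.map Prod.fst).toFinset.erase cur_node).card := Finset.card_le_card hsub
      _ < (graph.map Prod.fst).toFinset.card := Finset.card_erase_lt_of_mem hcurF
      _ ≤ (graph.map Prod.fst).length := List.toFinset_card_le _
      _ = graph.length := by simp
  have htot := pv_R_le_total graph (pvClassifyB group_num graph cur_node (groups, visited)).2 0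
  have hb := pv_bridge group_num graph graph.length (pvAdjB graph cur_node)
    (pvClassifyB group_num graph cur_node (groups, visited)) [] graph.length
    (graph.foldl (fun a p => a + p.2.length) 0 + (pvAdjB graph cur_node).length + 1)
    (graph.foldl (fun a p => a + p.2.length) 0 + (pvAdjB graph cur_node).length + 1)
    hc (le_refl _) (by simp only [List.length_nil]; omega) (by simp only [List.length_nil]; omega)
  rw [List.append_nil, pv_loop_nil] at hb
  exact hb.symm
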